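-- pv_equiv track=rewrite | github.com/yasuobinggan/Algorithm_competition | algorithm learning python/chapter 5/Look for the Hight ground - dfs.py | dfs
-- ===== SOURCE A (Python) =====
-- dir = [(0, 1), (0, -1), (1, 0), (-1, 0)]
--
-- def judge(Gmap, newi, newj, curi, curj, curset):
--     if newi < 0 or newi >= len(Gmap) or newj < 0 or newj >= len(Gmap[0]):
--         return False
--     if Gmap[newi][newj] > Gmap[curi][curj]:
--         return False
--     if (newi, newj) in curset:
--         return False
--     return True
--
-- def dfs(Gmap, i, j, curset):
--     topflag, bottomflag, leftflag, rightflag = False, False, False, False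
--     if i == 0:
--         topflag = True
--     if i == len(Gmap) - 1:
--         bottomflag = True
--     if j == 0:
--         leftflag = True
--     if j == len(Gmap[0]) - 1:
--         rightflag = True
--     curset.add((i, j))
--
--     for k in dir:
--         newi = i + k[0]
--         newj = j + k[1]
--         if judge(Gmap, newi, newj, i, j, curset):
--             a, b, c, d = dfs(Gmap, newi, newj, curset)
--             topflag = topflag or a
--             bottomflag = bottomflag or b
--             leftflag = leftflag or c
--             rightflag = rightflag or d
--
--     return topflag, bottomflag, leftflag, rightflag
-- ===== SOURCE B (Python) =====
-- def _admissible(Gmap, n, m, ci, cj, curset):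
--     out = []
--     for ni, nj in ((ci, cj + 1), (ci, cj - 1), (ci + 1, cj), (ci - 1, cj)):
--         if 0 <= ni < n and 0 <= nj < m and Gmap[ni][nj] <= Gmap[ci][cj] and (ni, nj) not in curset:
--             out.append((ni, nj))
--     return out
--
-- def dfs(Gmap, i, j, curset):
--     n, m = len(Gmap), len(Gmap[0])
--     top, bottom, left, right = i == 0, i == n - 1, j == 0, j == m - 1
--     curset.add((i, j))
--     stack = _admissible(Gmap, n, m, i, j, curset)
--     while stack:
--         ci, cj = stack.pop()
--         if (ci, cj) in curset:
--             continue
--         curset.add((ci, cj))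
--         top = top or ci == 0
--         bottom = bottom or ci == n - 1
--         left = left or cj == 0
--         right = right or cj == m - 1
--         stack.extend(_admissible(Gmap, n, m, ci, cj, curset))
--     return (top, bottom, left, right)
-- ===== Notes on version B (the rewrite author's own statement) =====
-- stated objective: idiomatic
-- what changed: The recursive DFS (one Python call per cell, flags merged up the call tree) is replaced by an iterative flood fill with an explicit worklist stack that marks cells at pop time and ORs the four border flags in a single loop.
import Mathlib
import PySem

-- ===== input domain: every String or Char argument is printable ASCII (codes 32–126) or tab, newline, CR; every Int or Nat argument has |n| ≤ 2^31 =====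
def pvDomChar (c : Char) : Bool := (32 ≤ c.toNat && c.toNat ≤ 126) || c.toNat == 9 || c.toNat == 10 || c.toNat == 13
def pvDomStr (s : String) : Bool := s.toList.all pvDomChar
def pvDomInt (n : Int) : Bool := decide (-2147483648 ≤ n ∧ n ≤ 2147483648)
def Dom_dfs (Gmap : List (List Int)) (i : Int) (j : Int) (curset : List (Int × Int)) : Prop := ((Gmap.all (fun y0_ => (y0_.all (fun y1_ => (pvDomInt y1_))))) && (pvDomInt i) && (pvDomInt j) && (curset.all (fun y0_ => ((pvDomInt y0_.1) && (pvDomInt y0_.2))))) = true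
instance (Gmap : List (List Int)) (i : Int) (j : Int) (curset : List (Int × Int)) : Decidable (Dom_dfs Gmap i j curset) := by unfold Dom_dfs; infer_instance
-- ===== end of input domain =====

-- B replaces A's recursive DFS by an iterative flood fill with an explicit worklist stack
-- (mark at pop, OR the border flags in one loop).  Both Pythons mutate `curset` to the same
-- final set; the theorems here are about the RETURN value (the four border flags).

-- shared grid accessors (values of A's len(Gmap), len(Gmap[0]), Gmap[a][b])
def pvM (G : List (List Int)) : Int :=
  match G with
  | [] => 0            -- Python raises here; Pre_dfs excludes the empty grid
  | r :: _ => (r.length : Int)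

-- Gmap[a][b] with Python's negative-index wraparound (exact wherever the Python read succeeds;
-- the getD defaults are never reached on inputs admitted by Pre_dfs)
def pvHt (G : List (List Int)) (a b : Int) : Int :=
  (PySem.List.pyGet? ((PySem.List.pyGet? G a).getD []) b).getD 0

-- the in-bounds integer cells of the grid (support of the termination measure)
def pvCells (G : List (List Int)) : List (Int × Int) :=
  (List.range G.length).flatMap (fun (a : Nat) => (List.range (pvM G).toNat).map (fun (b : Nat) => ((a : Int), (b : Int))))

-- termination measure: number of in-bounds cells not yet in S
def pvMu (G : List (List Int)) (S : List (Int × Int)) : Nat :=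
  ((pvCells G).filter (fun c => decide (c ∉ S))).length

-- ===== PORT A =====
-- literal port of `judge` (the three ifs, in order)
def judge (G : List (List Int)) (newi newj curi curj : Int) (S : List (Int × Int)) : Bool :=
  if newi < 0 ∨ newi ≥ (G.length : Int) ∨ newj < 0 ∨ newj ≥ pvM G then false
  else if pvHt G newi newj > pvHt G curi curj then false
  else if (newi, newj) ∈ S then false
  else true

-- A's recursion: dfsAuxF is dfs, dfsGoF its `for k in dir` loop (structural recursion over
-- the remaining direction list).  The recursion is driven by a fuel argument so that the port
-- is a plain structural recursion the kernel can evaluate; dfs always supplies more fuel than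
-- the measure pvMu, so the fuel-exhausted branch is never reached (proved by auxChar below).
def dfsGoF (G : List (List Int))
    (rec : Int → Int → List (Int × Int) → ((Bool × Bool × Bool × Bool) × List (Int × Int)))
    (i j : Int) : List (Int × Int) → (Bool × Bool × Bool × Bool) → List (Int × Int) →
      ((Bool × Bool × Bool × Bool) × List (Int × Int))
  | [], f, S => (f, S)
  | d :: ds, f, S =>
    if judge G (i + d.1) (j + d.2) i j S = true then
      let r := rec (i + d.1) (j + d.2) S
      dfsGoF G rec i j ds (f.1 || r.1.1, f.2.1 || r.1.2.1, f.2.2.1 || r.1.2.2.1, f.2.2.2 || r.1.2.2.2) r.2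
    else dfsGoF G rec i j ds f S

def dfsAuxF (G : List (List Int)) :
    Nat → Int → Int → List (Int × Int) → ((Bool × Bool × Bool × Bool) × List (Int × Int))
  | 0, _, _, S => ((false, false, false, false), S)   -- never reached from dfs
  | fuel + 1, i, j, S =>
    dfsGoF G (dfsAuxF G fuel) i j [(0, 1), (0, -1), (1, 0), (-1, 0)]
      (decide (i = 0), decide (i = (G.length : Int) - 1), decide (j = 0), decide (j = pvM G - 1))
      (PySem.Set.add S (i, j))

def dfs (Gmap : List (List Int)) (i : Int) (j : Int) (curset : List (Int × Int)) : Bool × Bool × Bool × Bool :=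
  (dfsAuxF Gmap (pvMu Gmap (PySem.Set.add curset (i, j)) + 1) i j curset).1

-- ===== PORT B =====
-- port of Source B's _admissible (the loop+append over the four candidates is their filter)
def pvAdm (G : List (List Int)) (n m ci cj : Int) (S : List (Int × Int)) : List (Int × Int) :=
  [(ci, cj + 1), (ci, cj - 1), (ci + 1, cj), (ci - 1, cj)].filter
    (fun c => decide (0 ≤ c.1) && decide (c.1 < n) && decide (0 ≤ c.2) && decide (c.2 < m)
      && decide (pvHt G c.1 c.2 ≤ pvHt G ci cj) && !(decide (c ∈ S)))

-- Source B's while loop; the stack is held top-first (Python pops from the end; extend pushes a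
-- block whose last element is popped first, hence `.reverse ++`).  Fuel-driven structural
-- recursion; dfs_alt supplies more fuel than the loop can consume (proved by bChar below).
def bLoopF (G : List (List Int)) :
    Nat → List (Int × Int) → List (Int × Int) → (Bool × Bool × Bool × Bool) →
      ((Bool × Bool × Bool × Bool) × List (Int × Int))
  | 0, _, S, f => (f, S)   -- never reached from dfs_alt
  | fuel + 1, stack, S, f =>
    match stack with
    | [] => (f, S)
    | c :: rest =>
      if c ∈ S then bLoopF G fuel rest S f
      else
        bLoopF G fuel
          ((pvAdm G (G.length : Int) (pvM G) c.1 c.2 (PySem.Set.add S c)).reverse ++ rest)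
          (PySem.Set.add S c)
          (f.1 || decide (c.1 = 0), f.2.1 || decide (c.1 = (G.length : Int) - 1),
           f.2.2.1 || decide (c.2 = 0), f.2.2.2 || decide (c.2 = pvM G - 1))

def dfs_alt (Gmap : List (List Int)) (i : Int) (j : Int) (curset : List (Int × Int)) : Bool × Bool × Bool × Bool :=
  let n : Int := (Gmap.length : Int)
  let m : Int := pvM Gmap
  let S0 := PySem.Set.add curset (i, j)
  let stack0 := (pvAdm Gmap n m i j S0).reverse
  (bLoopF Gmap (stack0.length + 4 * pvMu Gmap S0 + 1) stack0 S0
    (decide (i = 0), decide (i = n - 1), decide (j = 0), decide (j = m - 1))).1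

-- ===== PRECONDITION & SPEC =====
-- Pre_dfs excludes the inputs where Python A raises IndexError — the empty grid, and
-- out-of-range starts that have an in-bounds neighbour — together with grids whose later rows
-- are shorter than the first, on which A may or may not raise depending on the region explored
-- (cite: on [[1, 2], [3]] from (0, 0) both programs return (True, False, True, False)).
def Pre_dfs (Gmap : List (List Int)) (i : Int) (j : Int) (curset : List (Int × Int)) : Prop :=
  Gmap ≠ [] ∧
    (pvM Gmap = 0 ∨
     (¬ ((0 ≤ i ∧ i < (Gmap.length : Int) ∧ 0 ≤ j + 1 ∧ j + 1 < pvM Gmap) ∨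
         (0 ≤ i ∧ i < (Gmap.length : Int) ∧ 0 ≤ j - 1 ∧ j - 1 < pvM Gmap) ∨
         (0 ≤ i + 1 ∧ i + 1 < (Gmap.length : Int) ∧ 0 ≤ j ∧ j < pvM Gmap) ∨
         (0 ≤ i - 1 ∧ i - 1 < (Gmap.length : Int) ∧ 0 ≤ j ∧ j < pvM Gmap))) ∨
     ((∀ row ∈ Gmap, pvM Gmap ≤ (row.length : Int)) ∧
      -(Gmap.length : Int) ≤ i ∧ i < (Gmap.length : Int) ∧ -(pvM Gmap) ≤ j ∧ j < pvM Gmap))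
instance (Gmap : List (List Int)) (i : Int) (j : Int) (curset : List (Int × Int)) : Decidable (Pre_dfs Gmap i j curset) := by unfold Pre_dfs; infer_instance

def pvWitness_dfs : List (List Int) × Int × Int × (List (Int × Int)) := ([[1, 2], [3, 0]], 0, 0, [])

def Spec_dfs (Gmap : List (List Int)) (i : Int) (j : Int) (curset : List (Int × Int)) (out : Bool × Bool × Bool × Bool) : Prop := out = dfs_alt Gmap i j curset
instance (Gmap : List (List Int)) (i : Int) (j : Int) (curset : List (Int × Int)) (out : Bool × Bool × Bool × Bool) : Decidable (Spec_dfs Gmap i j curset out) := by unfold Spec_dfs; infer_instance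

-- ===== CLAIM (what is proved, stated in full; the proofs are below) =====
def Claim_equal_dfs : Prop := ∀ (Gmap : List (List Int)) (i : Int) (j : Int) (curset : List (Int × Int)), Dom_dfs Gmap i j curset → Pre_dfs Gmap i j curset → Spec_dfs Gmap i j curset (dfs Gmap i j curset)

-- ===== LEMMAS AND PROOFS =====

theorem mem_pvCells {G : List (List Int)} {c : Int × Int} :
    c ∈ pvCells G ↔ 0 ≤ c.1 ∧ c.1 < (G.length : Int) ∧ 0 ≤ c.2 ∧ c.2 < pvM G := by
  obtain ⟨x, y⟩ := c
  show _ ↔ 0 ≤ x ∧ x < (G.length : Int) ∧ 0 ≤ y ∧ y < pvM G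
  unfold pvCells
  rw [List.mem_flatMap]
  constructor
  · rintro ⟨a, ha, hmem⟩
    rw [List.mem_map] at hmem
    obtain ⟨b, hb, h⟩ := hmem
    rw [List.mem_range] at ha hb
    injection h with h1 h2
    subst h1
    subst h2
    omega
  · intro h
    refine ⟨x.toNat, by rw [List.mem_range]; omega, ?_⟩
    rw [List.mem_map]
    refine ⟨y.toNat, by rw [List.mem_range]; omega, ?_⟩
    rw [Prod.mk.injEq]
    constructor
    · omega
    · omega

theorem pv_filter_len_mono {α : Type} (l : List α) (p q : α → Bool)
    (h : ∀ a, p a = true → q a = true) : (l.filter p).length ≤ (l.filter q).length := by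
  induction l with
  | nil => simp
  | cons a t ih =>
    by_cases hpa : p a = true
    · rw [List.filter_cons_of_pos hpa, List.filter_cons_of_pos (h a hpa)]
      simpa using ih
    · rw [List.filter_cons_of_neg hpa]
      by_cases hqa : q a = true
      · rw [List.filter_cons_of_pos hqa]
        simp only [List.length_cons]
        omega
      · rw [List.filter_cons_of_neg hqa]
        exact ih

theorem pv_filter_len_lt {α : Type} (l : List α) (p q : α → Bool) (a : α)
    (hmem : a ∈ l) (hq : q a = true) (hp : p a = false)
    (h : ∀ x, p x = true → q x = true) : (l.filter p).length < (l.filter q).length := by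
  induction l with
  | nil => cases hmem
  | cons b t ih =>
    rcases List.mem_cons.mp hmem with rfl | hb
    · rw [List.filter_cons_of_neg (by simp [hp]), List.filter_cons_of_pos hq]
      simp only [List.length_cons]
      have hmono := pv_filter_len_mono t p q h
      omega
    · by_cases hpb : p b = true
      · rw [List.filter_cons_of_pos hpb, List.filter_cons_of_pos (h b hpb)]
        simp only [List.length_cons]
        have := ih hb
        omega
      · rw [List.filter_cons_of_neg hpb]
        by_cases hqb : q b = true
        · rw [List.filter_cons_of_pos hqb]
          simp only [List.length_cons]
          have := ih hb
          omega
        · rw [List.filter_cons_of_neg hqb]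
          exact ih hb

theorem pvMu_mono {G : List (List Int)} {S S' : List (Int × Int)}
    (h : ∀ x ∈ S, x ∈ S') : pvMu G S' ≤ pvMu G S := by
  refine pv_filter_len_mono _ _ _ (fun a ha => ?_)
  simp only [decide_eq_true_eq] at ha ⊢
  exact fun hmem => ha (h a hmem)

theorem pvMu_add_lt {G : List (List Int)} {S : List (Int × Int)} {c : Int × Int}
    (hc : c ∈ pvCells G) (hns : c ∉ S) : pvMu G (PySem.Set.add S c) < pvMu G S := by
  refine pv_filter_len_lt _ _ _ c hc (by simpa using hns) ?_ ?_
  · simp only [decide_eq_false_iff_not, Decidable.not_not]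
    exact (PySem.Set.mem_add _ _ _).mpr (Or.inr rfl)
  · intro x hx
    simp only [decide_eq_true_eq] at hx ⊢
    exact fun hmem => hx ((PySem.Set.mem_add _ _ _).mpr (Or.inl hmem))

theorem judge_iff {G : List (List Int)} {ni nj ci cj : Int} {S : List (Int × Int)} :
    judge G ni nj ci cj S = true ↔
      (0 ≤ ni ∧ ni < (G.length : Int) ∧ 0 ≤ nj ∧ nj < pvM G ∧
       pvHt G ni nj ≤ pvHt G ci cj ∧ (ni, nj) ∉ S) := by
  unfold judge
  split_ifs with h1 h2 h3 <;> simp_all <;> omega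

theorem mem_pvAdm_cells {G : List (List Int)} {ci cj : Int} {S : List (Int × Int)} {c : Int × Int}
    (h : c ∈ pvAdm G (G.length : Int) (pvM G) ci cj S) : c ∈ pvCells G := by
  have := (List.mem_filter.mp h).2
  simp only [Bool.and_eq_true, decide_eq_true_eq] at this
  exact mem_pvCells.mpr ⟨this.1.1.1.1.1, this.1.1.1.1.2, this.1.1.1.2, this.1.1.2⟩


def pvInbP (G : List (List Int)) (c : Int × Int) : Prop :=
  0 ≤ c.1 ∧ c.1 < (G.length : Int) ∧ 0 ≤ c.2 ∧ c.2 < pvM G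

-- one admissible step of the search: c' is one of c's four neighbours, in bounds, not higher
def Adm (G : List (List Int)) (c c' : Int × Int) : Prop :=
  (c' = (c.1, c.2 + 1) ∨ c' = (c.1, c.2 - 1) ∨ c' = (c.1 + 1, c.2) ∨ c' = (c.1 - 1, c.2)) ∧
    pvInbP G c' ∧ pvHt G c'.1 c'.2 ≤ pvHt G c.1 c.2

-- cells reachable from st by admissible steps whose targets avoid S
inductive Reach (G : List (List Int)) (S : List (Int × Int)) (st : Int × Int) : (Int × Int) → Prop
  | base : Reach G S st st
  | step {c c' : Int × Int} : Reach G S st c → Adm G c c' → c' ∉ S → Reach G S st c'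

theorem reach_mono {G : List (List Int)} {S S' : List (Int × Int)} {st x : Int × Int}
    (hss : ∀ y ∈ S, y ∈ S') (h : Reach G S' st x) : Reach G S st x := by
  induction h with
  | base => exact Reach.base
  | step _ hadm hns ih => exact Reach.step ih hadm (fun hx => hns (hss _ hx))

theorem reach_elem {G : List (List Int)} {S : List (Int × Int)} {st x : Int × Int}
    (h : Reach G S st x) : x = st ∨ x ∉ S := by
  induction h with
  | base => exact Or.inl rfl
  | step _ _ hns _ => exact Or.inr hns

theorem reach_trans {G : List (List Int)} {S : List (Int × Int)} {a b x : Int × Int}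
    (h1 : Reach G S a b) (h2 : Reach G S b x) : Reach G S a x := by
  induction h2 with
  | base => exact h1
  | step _ hadm hns ih => exact Reach.step ih hadm hns

theorem reach_avoid {G : List (List Int)} {S : List (Int × Int)} {a y x : Int × Int}
    (hy : a = y ∨ a ∉ S) (h : Reach G S a x) :
    x ∈ PySem.Set.add S y ∨
    (a ∉ PySem.Set.add S y ∧ Reach G (PySem.Set.add S y) a x) ∨
    (∃ w, Adm G y w ∧ w ∉ PySem.Set.add S y ∧ Reach G (PySem.Set.add S y) w x) := by
  induction h with
  | base =>
    by_cases ha : a ∈ PySem.Set.add S y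
    · exact Or.inl ha
    · exact Or.inr (Or.inl ⟨ha, Reach.base⟩)
  | @step c x' hr hadm hns ih =>
    by_cases hx : x' ∈ PySem.Set.add S y
    · exact Or.inl hx
    · rcases ih with hc | ⟨hna, hra⟩ | ⟨w, hw1, hw2, hw3⟩
      · -- c landed in add S y : either c = y (turn at y) or c ∈ S (then c = a = y)
        rcases (PySem.Set.mem_add _ _ _).mp hc with hcS | hcy
        · have hca : c = a := by
            rcases reach_elem hr with h | h
            · exact h
            · exact absurd hcS h
          have hay : a = y := by
            rcases hy with h | h
            · exact h
            · exact absurd (hca ▸ hcS) h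
          have hcyy : c = y := hca.trans hay
          exact Or.inr (Or.inr ⟨x', hcyy ▸ hadm, hx, Reach.base⟩)
        · exact Or.inr (Or.inr ⟨x', hcy ▸ hadm, hx, Reach.base⟩)
      · exact Or.inr (Or.inl ⟨hna, Reach.step hra hadm hx⟩)
      · exact Or.inr (Or.inr ⟨w, hw1, hw2, Reach.step hw3 hadm hx⟩)

theorem reach_escape {G : List (List Int)} {S S' : List (Int × Int)} {a x : Int × Int}
    (h : Reach G S a x) :
    x ∈ S' ∨ Reach G S' a x ∨
    (∃ z w, Reach G S a z ∧ z ∈ S' ∧ Adm G z w ∧ w ∉ S' ∧ Reach G S' w x) := by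
  induction h with
  | base =>
    by_cases ha : a ∈ S'
    · exact Or.inl ha
    · exact Or.inr (Or.inl Reach.base)
  | @step c x' hr hadm hns ih =>
    by_cases hx : x' ∈ S'
    · exact Or.inl hx
    · rcases ih with hc | hrc | ⟨z, w, hz1, hz2, hz3, hz4, hz5⟩
      · exact Or.inr (Or.inr ⟨c, x', hr, hc, hadm, hx, Reach.base⟩)
      · exact Or.inr (Or.inl (Reach.step hrc hadm hx))
      · exact Or.inr (Or.inr ⟨z, w, hz1, hz2, hz3, hz4, Reach.step hz5 hadm hx⟩)

def dirsL : List (Int × Int) := [(0, 1), (0, -1), (1, 0), (-1, 0)]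

theorem nbr_shape {d : Int × Int} (hd : d ∈ dirsL) (i j : Int) :
    (i + d.1, j + d.2) = (i, j + 1) ∨ (i + d.1, j + d.2) = (i, j - 1) ∨
    (i + d.1, j + d.2) = (i + 1, j) ∨ (i + d.1, j + d.2) = (i - 1, j) := by
  simp only [dirsL, List.mem_cons, List.not_mem_nil, or_false] at hd
  rcases hd with rfl | rfl | rfl | rfl <;> simp <;> omega

theorem dir_of_shape {w : Int × Int} {i j : Int}
    (h : w = (i, j + 1) ∨ w = (i, j - 1) ∨ w = (i + 1, j) ∨ w = (i - 1, j)) :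
    ∃ d ∈ dirsL, (i + d.1, j + d.2) = w := by
  rcases h with rfl | rfl | rfl | rfl
  · exact ⟨(0, 1), by simp [dirsL], by simp⟩
  · exact ⟨(0, -1), by simp [dirsL], by simp; omega⟩
  · exact ⟨(1, 0), by simp [dirsL], by simp⟩
  · exact ⟨(-1, 0), by simp [dirsL], by simp; omega⟩

theorem judge_of_adm {G : List (List Int)} {i j : Int} {S : List (Int × Int)} {nd : Int × Int}
    (hadm : Adm G (i, j) nd) (hns : nd ∉ S) : judge G nd.1 nd.2 i j S = true := by
  refine judge_iff.mpr ⟨hadm.2.1.1, hadm.2.1.2.1, hadm.2.1.2.2.1, hadm.2.1.2.2.2, hadm.2.2, ?_⟩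
  simpa using hns

theorem adm_of_judge {G : List (List Int)} {d : Int × Int} (hd : d ∈ dirsL) {i j : Int}
    {S : List (Int × Int)} (hj : judge G (i + d.1) (j + d.2) i j S = true) :
    Adm G (i, j) (i + d.1, j + d.2) ∧ (i + d.1, j + d.2) ∉ S := by
  have h := judge_iff.mp hj
  exact ⟨⟨nbr_shape hd i j, ⟨h.1, h.2.1, h.2.2.1, h.2.2.2.1⟩, h.2.2.2.2.1⟩, h.2.2.2.2.2⟩

-- key decompositions of the "some unvisited cell in T satisfies P" predicates
theorem key_iff {S S' T : List (Int × Int)} {nd : Int × Int} (P : (Int × Int) → Prop)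
    (h1 : nd ∈ S') (h2 : nd ∉ S) (hSS' : ∀ x ∈ S, x ∈ S') (hS'T : ∀ x ∈ S', x ∈ T) :
    (∃ c ∈ T, c ∉ S ∧ P c) ↔
      (P nd ∨ (∃ c ∈ S', c ∉ PySem.Set.add S nd ∧ P c) ∨ (∃ c ∈ T, c ∉ S' ∧ P c)) := by
  constructor
  · rintro ⟨c, hcT, hcS, hP⟩
    by_cases hc' : c ∈ S'
    · by_cases hce : c = nd
      · exact Or.inl (hce ▸ hP)
      · refine Or.inr (Or.inl ⟨c, hc', ?_, hP⟩)
        intro hmem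
        rcases (PySem.Set.mem_add _ _ _).mp hmem with h | h
        · exact hcS h
        · exact hce h
    · exact Or.inr (Or.inr ⟨c, hcT, hc', hP⟩)
  · rintro (hP | ⟨c, hcS', hcA, hP⟩ | ⟨c, hcT, hcS', hP⟩)
    · exact ⟨nd, hS'T _ h1, h2, hP⟩
    · exact ⟨c, hS'T _ hcS', fun h => hcA ((PySem.Set.mem_add _ _ _).mpr (Or.inl h)), hP⟩
    · exact ⟨c, hcT, fun h => hcS' (hSS' _ h), hP⟩

theorem key2_iff {S T : List (Int × Int)} {c0 : Int × Int} (P : (Int × Int) → Prop)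
    (hcT : c0 ∈ T) (hcS : c0 ∉ S) :
    (∃ x ∈ T, x ∉ S ∧ P x) ↔ (P c0 ∨ ∃ x ∈ T, x ∉ PySem.Set.add S c0 ∧ P x) := by
  constructor
  · rintro ⟨x, hxT, hxS, hP⟩
    by_cases hx : x = c0
    · exact Or.inl (hx ▸ hP)
    · refine Or.inr ⟨x, hxT, ?_, hP⟩
      intro hmem
      rcases (PySem.Set.mem_add _ _ _).mp hmem with h | h
      · exact hxS h
      · exact hx h
  · rintro (hP | ⟨x, hxT, hxA, hP⟩)
    · exact ⟨c0, hcT, hcS, hP⟩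
    · exact ⟨x, hxT, fun h => hxA ((PySem.Set.mem_add _ _ _).mpr (Or.inl h)), hP⟩

-- monotonicity: the visited set only grows
theorem dfsGoF_mono {G : List (List Int)}
    {rec : Int → Int → List (Int × Int) → ((Bool × Bool × Bool × Bool) × List (Int × Int))}
    (hrec : ∀ i' j' S', ∀ x ∈ S', x ∈ (rec i' j' S').2) (i j : Int) :
    ∀ (ds : List (Int × Int)) (f : Bool × Bool × Bool × Bool) (S : List (Int × Int)),
      ∀ x ∈ S, x ∈ (dfsGoF G rec i j ds f S).2 := by
  intro ds
  induction ds with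
  | nil => intro f S x hx; simpa [dfsGoF] using hx
  | cons d ds' ih =>
    intro f S x hx
    simp only [dfsGoF]
    by_cases hj : judge G (i + d.1) (j + d.2) i j S = true
    · rw [if_pos hj]
      exact ih _ _ x (hrec _ _ _ x hx)
    · rw [if_neg hj]
      exact ih _ _ x hx

theorem dfsAuxF_mono (G : List (List Int)) :
    ∀ (fuel : Nat) (i j : Int) (S : List (Int × Int)), ∀ x ∈ S, x ∈ (dfsAuxF G fuel i j S).2 := by
  intro fuel
  induction fuel with
  | zero => intro i j S x hx; simpa [dfsAuxF] using hx
  | succ fuel ih =>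
    intro i j S x hx
    simp only [dfsAuxF]
    exact dfsGoF_mono (fun i' j' S' => ih i' j' S') i j _ _ _ x
      ((PySem.Set.mem_add _ _ _).mpr (Or.inl hx))

-- the two simultaneous characterisations of A's recursion (valid when the fuel exceeds pvMu)
def AuxStmt (G : List (List Int)) (fuel : Nat) (i j : Int) (S : List (Int × Int)) : Prop :=
  (∀ x, x ∈ (dfsAuxF G fuel i j S).2 ↔ (x ∈ S ∨ Reach G S (i, j) x)) ∧
  (dfsAuxF G fuel i j S).1 =
    (decide (i = 0) || decide (∃ c ∈ (dfsAuxF G fuel i j S).2, c ∉ PySem.Set.add S (i, j) ∧ c.1 = 0),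
     decide (i = (G.length : Int) - 1) || decide (∃ c ∈ (dfsAuxF G fuel i j S).2, c ∉ PySem.Set.add S (i, j) ∧ c.1 = (G.length : Int) - 1),
     decide (j = 0) || decide (∃ c ∈ (dfsAuxF G fuel i j S).2, c ∉ PySem.Set.add S (i, j) ∧ c.2 = 0),
     decide (j = pvM G - 1) || decide (∃ c ∈ (dfsAuxF G fuel i j S).2, c ∉ PySem.Set.add S (i, j) ∧ c.2 = pvM G - 1))

def GoStmt (G : List (List Int)) (fuel : Nat) (i j : Int) (ds : List (Int × Int))
    (f : Bool × Bool × Bool × Bool) (S : List (Int × Int)) : Prop :=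
  (∀ x, x ∈ (dfsGoF G (dfsAuxF G fuel) i j ds f S).2 ↔
      (x ∈ S ∨ ∃ d ∈ ds, Adm G (i, j) (i + d.1, j + d.2) ∧ (i + d.1, j + d.2) ∉ S ∧
        Reach G S (i + d.1, j + d.2) x)) ∧
  (dfsGoF G (dfsAuxF G fuel) i j ds f S).1 =
    (f.1 || decide (∃ c ∈ (dfsGoF G (dfsAuxF G fuel) i j ds f S).2, c ∉ S ∧ c.1 = 0),
     f.2.1 || decide (∃ c ∈ (dfsGoF G (dfsAuxF G fuel) i j ds f S).2, c ∉ S ∧ c.1 = (G.length : Int) - 1),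
     f.2.2.1 || decide (∃ c ∈ (dfsGoF G (dfsAuxF G fuel) i j ds f S).2, c ∉ S ∧ c.2 = 0),
     f.2.2.2 || decide (∃ c ∈ (dfsGoF G (dfsAuxF G fuel) i j ds f S).2, c ∉ S ∧ c.2 = pvM G - 1))

theorem dirs_tail {d : Int × Int} {ds : List (Int × Int)}
    (h : ∀ d' ∈ d :: ds, d' ∈ dirsL) : ∀ d' ∈ ds, d' ∈ dirsL :=
  fun d' hd' => h d' (List.mem_cons_of_mem _ hd')

theorem goChar (G : List (List Int)) (fuel : Nat) (i j : Int)
    (IH : ∀ i' j' S', pvMu G (PySem.Set.add S' (i', j')) < fuel → AuxStmt G fuel i' j' S') :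
    ∀ (ds : List (Int × Int)), (∀ d ∈ ds, d ∈ dirsL) →
      ∀ f S, pvMu G S ≤ fuel → GoStmt G fuel i j ds f S := by
  intro ds
  induction ds with
  | nil =>
    intro _ f S _
    constructor
    · intro x
      simp only [dfsGoF]
      simp
    · simp only [dfsGoF]
      have hno : ∀ (P : (Int × Int) → Prop), ¬ (∃ c ∈ S, c ∉ S ∧ P c) := by
        rintro P ⟨c, hcm, hnc, _⟩; exact hnc hcm
      simp [hno]
  | cons d ds' ih =>
    intro hds f S hK
    have hd : d ∈ dirsL := hds d List.mem_cons_self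
    have hds' : ∀ d' ∈ ds', d' ∈ dirsL := dirs_tail hds
    by_cases hj : judge G (i + d.1) (j + d.2) i j S = true
    · obtain ⟨hadm, hnds⟩ := adm_of_judge hd hj
      have hmu : pvMu G (PySem.Set.add S (i + d.1, j + d.2)) < fuel :=
        lt_of_lt_of_le
          (pvMu_add_lt (mem_pvCells.mpr
            ⟨hadm.2.1.1, hadm.2.1.2.1, hadm.2.1.2.2.1, hadm.2.1.2.2.2⟩) hnds) hK
      have hAux := IH (i + d.1) (j + d.2) S hmu
      have hSS' : ∀ x ∈ S, x ∈ (dfsAuxF G fuel (i + d.1) (j + d.2) S).2 :=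
        fun x hx => dfsAuxF_mono G fuel (i + d.1) (j + d.2) S x hx
      have hK' : pvMu G (dfsAuxF G fuel (i + d.1) (j + d.2) S).2 ≤ fuel :=
        le_trans (pvMu_mono hSS') hK
      have hgo := ih hds'
        (f.1 || (dfsAuxF G fuel (i + d.1) (j + d.2) S).1.1,
         f.2.1 || (dfsAuxF G fuel (i + d.1) (j + d.2) S).1.2.1,
         f.2.2.1 || (dfsAuxF G fuel (i + d.1) (j + d.2) S).1.2.2.1,
         f.2.2.2 || (dfsAuxF G fuel (i + d.1) (j + d.2) S).1.2.2.2)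
        (dfsAuxF G fuel (i + d.1) (j + d.2) S).2 hK'
      have hunf : dfsGoF G (dfsAuxF G fuel) i j (d :: ds') f S =
          dfsGoF G (dfsAuxF G fuel) i j ds'
            (f.1 || (dfsAuxF G fuel (i + d.1) (j + d.2) S).1.1,
             f.2.1 || (dfsAuxF G fuel (i + d.1) (j + d.2) S).1.2.1,
             f.2.2.1 || (dfsAuxF G fuel (i + d.1) (j + d.2) S).1.2.2.1,
             f.2.2.2 || (dfsAuxF G fuel (i + d.1) (j + d.2) S).1.2.2.2)
            (dfsAuxF G fuel (i + d.1) (j + d.2) S).2 := by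
        simp only [dfsGoF]
        rw [if_pos hj]
      have hndS' : (i + d.1, j + d.2) ∈ (dfsAuxF G fuel (i + d.1) (j + d.2) S).2 :=
        (hAux.1 _).mpr (Or.inr Reach.base)
      have hS'T : ∀ x ∈ (dfsAuxF G fuel (i + d.1) (j + d.2) S).2,
          x ∈ (dfsGoF G (dfsAuxF G fuel) i j ds' _ (dfsAuxF G fuel (i + d.1) (j + d.2) S).2).2 :=
        fun x hx => (hgo.1 x).mpr (Or.inl hx)
      constructor
      · intro x
        rw [hunf]
        constructor
        · intro hxT
          rcases (hgo.1 x).mp hxT with hxS' | ⟨d', hd', h1, h2, h3⟩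
          · rcases (hAux.1 x).mp hxS' with hxS | hrx
            · exact Or.inl hxS
            · exact Or.inr ⟨d, List.mem_cons_self, hadm, hnds, hrx⟩
          · exact Or.inr ⟨d', List.mem_cons_of_mem _ hd', h1,
              fun hm => h2 (hSS' _ hm), reach_mono hSS' h3⟩
        · intro hx
          apply (hgo.1 x).mpr
          rcases hx with hxS | ⟨d'', hd'', ha'', hn'', hr''⟩
          · exact Or.inl (hSS' x hxS)
          · rcases List.mem_cons.mp hd'' with rfl | htail
            · exact Or.inl ((hAux.1 x).mpr (Or.inr hr''))
            · rcases reach_escape hr'' with hxS' | hre | ⟨z, w, hz1, hz2, hz3, hz4, hz5⟩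
              · exact Or.inl hxS'
              · by_cases hmem : (i + d''.1, j + d''.2) ∈ (dfsAuxF G fuel (i + d.1) (j + d.2) S).2
                · have h9 : Reach G S (i + d.1, j + d.2) (i + d''.1, j + d''.2) := by
                    rcases (hAux.1 _).mp hmem with h | h
                    · exact absurd h hn''
                    · exact h
                  exact Or.inl ((hAux.1 x).mpr (Or.inr (reach_trans h9 hr'')))
                · exact Or.inr ⟨d'', htail, ha'', hmem, hre⟩
              · have hzS : z ∉ S := by
                  rcases reach_elem hz1 with rfl | h
                  · exact hn''
                  · exact h
                have hzr : Reach G S (i + d.1, j + d.2) z := by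
                  rcases (hAux.1 z).mp hz2 with h | h
                  · exact absurd h hzS
                  · exact h
                have hwS : w ∉ S := fun hw => hz4 (hSS' _ hw)
                exact absurd ((hAux.1 w).mpr (Or.inr (Reach.step hzr hz3 hwS))) hz4
      · have hf1 : (dfsAuxF G fuel (i + d.1) (j + d.2) S).1.1 = true ↔
            ((i + d.1 = 0) ∨ ∃ c ∈ (dfsAuxF G fuel (i + d.1) (j + d.2) S).2,
              c ∉ PySem.Set.add S (i + d.1, j + d.2) ∧ c.1 = 0) := by
          rw [hAux.2]; simp
        have hf2 : (dfsAuxF G fuel (i + d.1) (j + d.2) S).1.2.1 = true ↔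
            ((i + d.1 = (G.length : Int) - 1) ∨ ∃ c ∈ (dfsAuxF G fuel (i + d.1) (j + d.2) S).2,
              c ∉ PySem.Set.add S (i + d.1, j + d.2) ∧ c.1 = (G.length : Int) - 1) := by
          rw [hAux.2]; simp
        have hf3 : (dfsAuxF G fuel (i + d.1) (j + d.2) S).1.2.2.1 = true ↔
            ((j + d.2 = 0) ∨ ∃ c ∈ (dfsAuxF G fuel (i + d.1) (j + d.2) S).2,
              c ∉ PySem.Set.add S (i + d.1, j + d.2) ∧ c.2 = 0) := by
          rw [hAux.2]; simp
        have hf4 : (dfsAuxF G fuel (i + d.1) (j + d.2) S).1.2.2.2 = true ↔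
            ((j + d.2 = pvM G - 1) ∨ ∃ c ∈ (dfsAuxF G fuel (i + d.1) (j + d.2) S).2,
              c ∉ PySem.Set.add S (i + d.1, j + d.2) ∧ c.2 = pvM G - 1) := by
          rw [hAux.2]; simp
        rw [hunf, hgo.2]
        have hk1 := key_iff (fun c => c.1 = 0) hndS' hnds hSS' hS'T
        have hk2 := key_iff (fun c => c.1 = (G.length : Int) - 1) hndS' hnds hSS' hS'T
        have hk3 := key_iff (fun c => c.2 = 0) hndS' hnds hSS' hS'T
        have hk4 := key_iff (fun c => c.2 = pvM G - 1) hndS' hnds hSS' hS'T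
        simp only [Prod.mk.injEq]
        refine ⟨?_, ?_, ?_, ?_⟩ <;>
          [(have hk := hk1; have hf := hf1); (have hk := hk2; have hf := hf2);
           (have hk := hk3; have hf := hf3); (have hk := hk4; have hf := hf4)] <;>
        · rw [Bool.eq_iff_iff]
          simp only [Bool.or_eq_true, decide_eq_true_eq]
          rw [hf]
          constructor
          · rintro ((hf0 | hX | hY) | hZ)
            · exact Or.inl hf0
            · exact Or.inr (hk.mpr (Or.inl hX))
            · exact Or.inr (hk.mpr (Or.inr (Or.inl hY)))
            · exact Or.inr (hk.mpr (Or.inr (Or.inr hZ)))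
          · rintro (hf0 | hE)
            · exact Or.inl (Or.inl hf0)
            · rcases hk.mp hE with hX | hY | hZ
              · exact Or.inl (Or.inr (Or.inl hX))
              · exact Or.inl (Or.inr (Or.inr hY))
              · exact Or.inr hZ
    · have hgo := ih hds' f S hK
      have hunf : dfsGoF G (dfsAuxF G fuel) i j (d :: ds') f S =
          dfsGoF G (dfsAuxF G fuel) i j ds' f S := by
        simp only [dfsGoF]
        rw [if_neg hj]
      constructor
      · intro x
        rw [hunf]
        constructor
        · intro hxT
          rcases (hgo.1 x).mp hxT with hxS | ⟨d', hd', h1, h2, h3⟩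
          · exact Or.inl hxS
          · exact Or.inr ⟨d', List.mem_cons_of_mem _ hd', h1, h2, h3⟩
        · intro hx
          apply (hgo.1 x).mpr
          rcases hx with hxS | ⟨d'', hd'', ha'', hn'', hr''⟩
          · exact Or.inl hxS
          · rcases List.mem_cons.mp hd'' with rfl | htail
            · exact absurd (judge_of_adm ha'' hn'') hj
            · exact Or.inr ⟨d'', htail, ha'', hn'', hr''⟩
      · rw [hunf]
        exact hgo.2

theorem auxChar : ∀ (fuel : Nat) (G : List (List Int)) (i j : Int) (S : List (Int × Int)),
    pvMu G (PySem.Set.add S (i, j)) < fuel → AuxStmt G fuel i j S := by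
  intro fuel
  induction fuel with
  | zero => intro G i j S h; exact absurd h (Nat.not_lt_zero _)
  | succ fuel ihf =>
  intro G i j S hK
  have hIH : ∀ i' j' S', pvMu G (PySem.Set.add S' (i', j')) < fuel → AuxStmt G fuel i' j' S' :=
    fun i' j' S' h => ihf G i' j' S' h
  have hgo := goChar G fuel i j hIH dirsL (fun _ hd => hd)
    (decide (i = 0), decide (i = (G.length : Int) - 1), decide (j = 0), decide (j = pvM G - 1))
    (PySem.Set.add S (i, j)) (by omega)
  have hunf : dfsAuxF G (fuel + 1) i j S =
      dfsGoF G (dfsAuxF G fuel) i j dirsL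
        (decide (i = 0), decide (i = (G.length : Int) - 1), decide (j = 0), decide (j = pvM G - 1))
        (PySem.Set.add S (i, j)) := by
    simp only [dfsAuxF, dirsL]
  have hsub : ∀ y ∈ S, y ∈ PySem.Set.add S (i, j) :=
    fun y hy => (PySem.Set.mem_add _ _ _).mpr (Or.inl hy)
  -- the characterisation at fuel+1 follows, but it must be restated at fuel+1's own recursion
  constructor
  · intro x
    rw [hunf]
    constructor
    · intro hxT
      rcases (hgo.1 x).mp hxT with hxS0 | ⟨d, hd, ha, hn, hr⟩
      · rcases (PySem.Set.mem_add _ _ _).mp hxS0 with h | h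
        · exact Or.inl h
        · exact Or.inr (h ▸ Reach.base)
      · have hn' : (i + d.1, j + d.2) ∉ S := fun hm => hn (hsub _ hm)
        exact Or.inr (reach_trans (Reach.step Reach.base ha hn') (reach_mono hsub hr))
    · intro hx
      apply (hgo.1 x).mpr
      rcases hx with hxS | hr
      · exact Or.inl (hsub _ hxS)
      · rcases reach_avoid (Or.inl rfl) hr with h1 | ⟨h2, _⟩ | ⟨w, hw1, hw2, hw3⟩
        · exact Or.inl h1
        · exact absurd ((PySem.Set.mem_add _ _ _).mpr (Or.inr rfl)) h2
        · obtain ⟨dd, hdd, hde⟩ := dir_of_shape hw1.1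
          exact Or.inr ⟨dd, hdd, hde ▸ hw1, hde ▸ hw2, hde ▸ hw3⟩
  · have h2 := hgo.2
    rw [hunf]
    exact h2

-- B's loop characterisation (valid when the fuel exceeds what the loop can consume)
def BStmt (G : List (List Int)) (fuel : Nat) (stack S : List (Int × Int))
    (f : Bool × Bool × Bool × Bool) : Prop :=
  (∀ x, x ∈ (bLoopF G fuel stack S f).2 ↔
      (x ∈ S ∨ ∃ z ∈ stack, z ∉ S ∧ Reach G S z x)) ∧
  (bLoopF G fuel stack S f).1 =
    (f.1 || decide (∃ c ∈ (bLoopF G fuel stack S f).2, c ∉ S ∧ c.1 = 0),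
     f.2.1 || decide (∃ c ∈ (bLoopF G fuel stack S f).2, c ∉ S ∧ c.1 = (G.length : Int) - 1),
     f.2.2.1 || decide (∃ c ∈ (bLoopF G fuel stack S f).2, c ∉ S ∧ c.2 = 0),
     f.2.2.2 || decide (∃ c ∈ (bLoopF G fuel stack S f).2, c ∉ S ∧ c.2 = pvM G - 1))

theorem mem_pvAdm_iff {G : List (List Int)} {ci cj : Int} {S : List (Int × Int)} {c : Int × Int} :
    c ∈ pvAdm G (G.length : Int) (pvM G) ci cj S ↔ (Adm G (ci, cj) c ∧ c ∉ S) := by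
  unfold pvAdm Adm pvInbP
  simp only [List.mem_filter, List.mem_cons, List.not_mem_nil, or_false,
    Bool.and_eq_true, decide_eq_true_eq, Bool.not_eq_true', decide_eq_false_iff_not]
  constructor
  · rintro ⟨h4, hcond⟩
    exact ⟨⟨h4, ⟨hcond.1.1.1.1.1, hcond.1.1.1.1.2, hcond.1.1.1.2, hcond.1.1.2⟩, hcond.1.2⟩, hcond.2⟩
  · rintro ⟨⟨h4, hb, hh⟩, hs⟩
    exact ⟨h4, ⟨⟨⟨⟨⟨hb.1, hb.2.1⟩, hb.2.2.1⟩, hb.2.2.2⟩, hh⟩, hs⟩⟩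

theorem pvAdm_length_le {G : List (List Int)} {n m ci cj : Int} {S : List (Int × Int)} :
    (pvAdm G n m ci cj S).length ≤ 4 := by
  unfold pvAdm
  exact le_trans (List.length_filter_le _ _) (by simp)

theorem bChar : ∀ (fuel : Nat) (G : List (List Int)) (stack S : List (Int × Int))
    (f : Bool × Bool × Bool × Bool), (∀ c ∈ stack, c ∈ pvCells G) →
    stack.length + 4 * pvMu G S < fuel → BStmt G fuel stack S f := by
  intro fuel
  induction fuel with
  | zero => intro G stack S f _ h; exact absurd h (Nat.not_lt_zero _)
  | succ fuel ihf =>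
  intro G stack S f hst hfuel
  match stack, hst, hfuel with
  | [], _, _ =>
    constructor
    · intro x
      simp only [bLoopF]
      simp
    · simp only [bLoopF]
      have hno : ∀ (P : (Int × Int) → Prop), ¬ (∃ c ∈ S, c ∉ S ∧ P c) := by
        rintro P ⟨c, h1, h2, _⟩; exact h2 h1
      simp [hno]
  | c :: rest, hst, hfuel =>
    by_cases hc : c ∈ S
    · have hunf : bLoopF G (fuel + 1) (c :: rest) S f = bLoopF G fuel rest S f := by
        simp only [bLoopF]
        rw [if_pos hc]
      have hrec := ihf G rest S f (fun x hx => hst x (List.mem_cons_of_mem _ hx))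
        (by simp only [List.length_cons] at hfuel; omega)
      constructor
      · intro x
        rw [hunf]
        constructor
        · intro hxT
          rcases (hrec.1 x).mp hxT with h | ⟨z, hz, h1, h2⟩
          · exact Or.inl h
          · exact Or.inr ⟨z, List.mem_cons_of_mem _ hz, h1, h2⟩
        · intro hx
          apply (hrec.1 x).mpr
          rcases hx with h | ⟨z, hz, h1, h2⟩
          · exact Or.inl h
          · rcases List.mem_cons.mp hz with rfl | hz'
            · exact absurd hc h1
            · exact Or.inr ⟨z, hz', h1, h2⟩
      · rw [hunf]
        exact hrec.2
    · have hst2 : ∀ x ∈ (pvAdm G (G.length : Int) (pvM G) c.1 c.2 (PySem.Set.add S c)).reverse ++ rest,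
          x ∈ pvCells G := by
        intro x hx
        rcases List.mem_append.mp hx with h | h
        · exact mem_pvAdm_cells (List.mem_reverse.mp h)
        · exact hst x (List.mem_cons_of_mem _ h)
      have hμ : pvMu G (PySem.Set.add S c) < pvMu G S :=
        pvMu_add_lt (hst c List.mem_cons_self) hc
      have hfuel2 : ((pvAdm G (G.length : Int) (pvM G) c.1 c.2 (PySem.Set.add S c)).reverse ++ rest).length
          + 4 * pvMu G (PySem.Set.add S c) < fuel := by
        rw [List.length_append, List.length_reverse]
        have hlen : (pvAdm G (G.length : Int) (pvM G) c.1 c.2 (PySem.Set.add S c)).length ≤ 4 :=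
          pvAdm_length_le
        simp only [List.length_cons] at hfuel
        omega
      have hunf : bLoopF G (fuel + 1) (c :: rest) S f =
          bLoopF G fuel ((pvAdm G (G.length : Int) (pvM G) c.1 c.2 (PySem.Set.add S c)).reverse ++ rest)
            (PySem.Set.add S c)
            (f.1 || decide (c.1 = 0), f.2.1 || decide (c.1 = (G.length : Int) - 1),
             f.2.2.1 || decide (c.2 = 0), f.2.2.2 || decide (c.2 = pvM G - 1)) := by
        simp only [bLoopF]
        rw [if_neg hc]
      have hrec := ihf G ((pvAdm G (G.length : Int) (pvM G) c.1 c.2 (PySem.Set.add S c)).reverse ++ rest)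
        (PySem.Set.add S c)
        (f.1 || decide (c.1 = 0), f.2.1 || decide (c.1 = (G.length : Int) - 1),
         f.2.2.1 || decide (c.2 = 0), f.2.2.2 || decide (c.2 = pvM G - 1)) hst2 hfuel2
      have hsub : ∀ y ∈ S, y ∈ PySem.Set.add S c :=
        fun y hy => (PySem.Set.mem_add _ _ _).mpr (Or.inl hy)
      constructor
      · intro x
        rw [hunf]
        constructor
        · intro hxT
          rcases (hrec.1 x).mp hxT with hxS' | ⟨z, hz, h1, h2⟩
          · rcases (PySem.Set.mem_add _ _ _).mp hxS' with h | h
            · exact Or.inl h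
            · exact Or.inr ⟨c, List.mem_cons_self, hc, h ▸ Reach.base⟩
          · rcases List.mem_append.mp hz with hzP | hzR
            · have hmm := mem_pvAdm_iff.mp (List.mem_reverse.mp hzP)
              have hzS : z ∉ S := fun hm => hmm.2 (hsub _ hm)
              exact Or.inr ⟨c, List.mem_cons_self, hc,
                reach_trans (Reach.step Reach.base hmm.1 hzS) (reach_mono hsub h2)⟩
            · have hzS : z ∉ S := fun hm => h1 (hsub _ hm)
              exact Or.inr ⟨z, List.mem_cons_of_mem _ hzR, hzS, reach_mono hsub h2⟩
        · intro hx
          apply (hrec.1 x).mpr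
          rcases hx with hxS | ⟨z, hz, h1, h2⟩
          · exact Or.inl (hsub _ hxS)
          · rcases reach_avoid (Or.inr h1) h2 with h3 | ⟨h4, h5⟩ | ⟨w, hw1, hw2, hw3⟩
            · exact Or.inl h3
            · have hzr : z ∈ rest := by
                rcases List.mem_cons.mp hz with rfl | h
                · exact absurd ((PySem.Set.mem_add _ _ _).mpr (Or.inr rfl)) h4
                · exact h
              exact Or.inr ⟨z, List.mem_append.mpr (Or.inr hzr), h4, h5⟩
            · exact Or.inr ⟨w,
                List.mem_append.mpr (Or.inl (List.mem_reverse.mpr (mem_pvAdm_iff.mpr ⟨hw1, hw2⟩))),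
                hw2, hw3⟩
      · have hcT := (hrec.1 c).mpr (Or.inl ((PySem.Set.mem_add _ _ _).mpr (Or.inr rfl)))
        rw [hunf, hrec.2]
        have hk1 := key2_iff (fun x => x.1 = 0) hcT hc
        have hk2 := key2_iff (fun x => x.1 = (G.length : Int) - 1) hcT hc
        have hk3 := key2_iff (fun x => x.2 = 0) hcT hc
        have hk4 := key2_iff (fun x => x.2 = pvM G - 1) hcT hc
        simp only [Prod.mk.injEq]
        refine ⟨?_, ?_, ?_, ?_⟩ <;>
          [have hk := hk1; have hk := hk2; have hk := hk3; have hk := hk4] <;>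
        · rw [Bool.eq_iff_iff]
          simp only [Bool.or_eq_true, decide_eq_true_eq]
          constructor
          · rintro ((hf | hX) | hY)
            · exact Or.inl hf
            · exact Or.inr (hk.mpr (Or.inl hX))
            · exact Or.inr (hk.mpr (Or.inr hY))
          · rintro (hf | hE)
            · exact Or.inl (Or.inl hf)
            · rcases hk.mp hE with hX | hY
              · exact Or.inl (Or.inr hX)
              · exact Or.inr hY

-- ===== VERDICT (by name: the statement is the Claim_ definition above) =====
theorem dfs_spec : Claim_equal_dfs := by
  intro G i j S _ _
  unfold Spec_dfs dfs dfs_alt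
  dsimp only
  have hA := auxChar (pvMu G (PySem.Set.add S (i, j)) + 1) G i j S (Nat.lt_succ_self _)
  have h0 : ∀ x ∈ (pvAdm G (G.length : Int) (pvM G) i j (PySem.Set.add S (i, j))).reverse,
      x ∈ pvCells G := fun x hx => mem_pvAdm_cells (List.mem_reverse.mp hx)
  have hB := bChar
    ((pvAdm G (G.length : Int) (pvM G) i j (PySem.Set.add S (i, j))).reverse.length
      + 4 * pvMu G (PySem.Set.add S (i, j)) + 1) G
    ((pvAdm G (G.length : Int) (pvM G) i j (PySem.Set.add S (i, j))).reverse)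
    (PySem.Set.add S (i, j))
    (decide (i = 0), decide (i = (G.length : Int) - 1), decide (j = 0), decide (j = pvM G - 1))
    h0 (Nat.lt_succ_self _)
  have hset : ∀ x, x ∈ (dfsAuxF G (pvMu G (PySem.Set.add S (i, j)) + 1) i j S).2 ↔
      x ∈ (bLoopF G
        ((pvAdm G (G.length : Int) (pvM G) i j (PySem.Set.add S (i, j))).reverse.length
          + 4 * pvMu G (PySem.Set.add S (i, j)) + 1)
        ((pvAdm G (G.length : Int) (pvM G) i j (PySem.Set.add S (i, j))).reverse)
        (PySem.Set.add S (i, j))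
        (decide (i = 0), decide (i = (G.length : Int) - 1), decide (j = 0), decide (j = pvM G - 1))).2 := by
    intro x
    rw [hA.1 x, hB.1 x]
    constructor
    · rintro (hxS | hr)
      · exact Or.inl ((PySem.Set.mem_add _ _ _).mpr (Or.inl hxS))
      · rcases reach_avoid (Or.inl rfl) hr with h1 | ⟨h2, _⟩ | ⟨w, hw1, hw2, hw3⟩
        · exact Or.inl h1
        · exact absurd ((PySem.Set.mem_add _ _ _).mpr (Or.inr rfl)) h2
        · exact Or.inr ⟨w, List.mem_reverse.mpr (mem_pvAdm_iff.mpr ⟨hw1, hw2⟩), hw2, hw3⟩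
    · rintro (hxS0 | ⟨z, hz, h1, h2⟩)
      · rcases (PySem.Set.mem_add _ _ _).mp hxS0 with h | h
        · exact Or.inl h
        · exact Or.inr (h ▸ Reach.base)
      · have hmm := mem_pvAdm_iff.mp (List.mem_reverse.mp hz)
        have hz1 : z ∉ S := fun hm => h1 ((PySem.Set.mem_add _ _ _).mpr (Or.inl hm))
        exact Or.inr (reach_trans (Reach.step Reach.base hmm.1 hz1)
          (reach_mono (fun y hy => (PySem.Set.mem_add _ _ _).mpr (Or.inl hy)) h2))
  rw [hA.2, hB.2]
  simp only [Prod.mk.injEq]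
  refine ⟨?_, ?_, ?_, ?_⟩ <;>
  · rw [Bool.eq_iff_iff]
    simp only [Bool.or_eq_true, decide_eq_true_eq]
    constructor
    · rintro (h | ⟨cc, h1, h2, h3⟩)
      · exact Or.inl h
      · exact Or.inr ⟨cc, (hset cc).mp h1, h2, h3⟩
    · rintro (h | ⟨cc, h1, h2, h3⟩)
      · exact Or.inl h
      · exact Or.inr ⟨cc, (hset cc).mpr h1, h2, h3⟩
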